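-- pv_equiv track=rewrite | github.com/ShahnawazDev/ip-project-evaluation | Parag Prashun/metro_simulation_test.py | case1
-- ===== SOURCE A (Python) =====
-- def m_h(f):
--     k,l = f//60, f%60
--     return f'{k:02d}:{l:02d}'
--
-- def timedealer(time):
--     if 480 <= time < 600 or 1020 <= time< 1140:
--         return 4
--     return 8
--
-- def case5(timesum,timee):
--     if timee > 1380:
--         return "Metro is closed now"
--     if timee >= timesum:
--         timee1=timedealer(timee)+timee
--         timee2=timedealer(timee1)+timee1
--         timee3=timedealer(timee2)+timee2
--         timee4=timedealer(timee3)+timee3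
--         l=[timee1,timee2,timee3,timee4]
--
--         l=[x for x in l if x<1380]
--         if len(l)==4:
--             return(f"Next metro at: {m_h(timee)}\nSubsequent metros at {m_h(l[0])},{m_h(l[1])},{m_h(l[2])},{m_h(l[3])}...")
--         elif len(l)==3:
--             return(f"Next metro at: {m_h(timee)}\nSubsequent metros at {m_h(l[0])},{m_h(l[1])},{m_h(l[2])},")
--         elif len(l)==2:
--             return(f"Next metro at: {m_h(timee)}\nSubsequent metros at {m_h(l[0])},{m_h(l[1])}")
--         elif len(l)==1:
--             return(f"Next metro at: {m_h(timee)}\nSubsequent metros at {m_h(l[0])},")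
--     return case5(timesum, timee+8)
--
-- def case4peak(timesum,timee):
--     if timee >= timesum:
--         timee1=timedealer(timee)+timee
--         timee2=timedealer(timee1)+timee1
--         timee3=timedealer(timee2)+timee2
--         timee4=timedealer(timee3)+timee3
--         return(f"Next metro at: {m_h(timee)}\nSubsequent metros at {m_h(timee1)},{m_h(timee2)},{m_h(timee3)},{m_h(timee4)}...")
--     if timee > 1140:
--         return case5(timesum,timee)
--     return case4peak(timesum, timee+4)
--
-- def case3(timesum,timee):
--     if timee >= timesum:
--         timee1=timedealer(timee)+timee
--         timee2=timedealer(timee1)+timee1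
--         timee3=timedealer(timee2)+timee2
--         timee4=timedealer(timee3)+timee3
--         return(f"Next metro at: {m_h(timee)}\nSubsequent metros at {m_h(timee1)},{m_h(timee2)},{m_h(timee3)},{m_h(timee4)}...")
--     if timee > 1020:
--         return case4peak(timesum,timee)
--     return case3(timesum, timee+8)
--
-- def case2peak(timesum,timee):
--     if timee >= timesum:
--         timee1=timedealer(timee)+timee
--         timee2=timedealer(timee1)+timee1
--         timee3=timedealer(timee2)+timee2
--         timee4=timedealer(timee3)+timee3
--         return(f"Next metro at: {m_h(timee)}\nSubsequent metros at {m_h(timee1)},{m_h(timee2)},{m_h(timee3)},{m_h(timee4)}...")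
--     if timee > 600:
--         return case3(timesum,timee)
--     return case2peak(timesum, timee+4)
--
-- def case1(timesum,timee):
--     if timee >= timesum:
--         timee1=timedealer(timee)+timee
--         timee2=timedealer(timee1)+timee1
--         timee3=timedealer(timee2)+timee2
--         timee4=timedealer(timee3)+timee3
--         return(f"Next metro at: {m_h(timee)}\nSubsequent metros at {m_h(timee1)},{m_h(timee2)},{m_h(timee3)},{m_h(timee4)}...")
--     if timee > 480:
--         return case2peak(timesum,timee)
--     return case1(timesum, timee+8)
-- ===== SOURCE B (Python) =====
-- def m_h(f):
--     k, l = f // 60, f % 60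
--     return f'{k:02d}:{l:02d}'
--
-- def timedealer(time):
--     if 480 <= time < 600 or 1020 <= time < 1140:
--         return 4
--     return 8
--
-- def _next4(t):
--     out = []
--     for _ in range(4):
--         t = t + timedealer(t)
--         out.append(t)
--     return out
--
-- def case1(timesum, timee):
--     t = timee
--     in5 = False  # True once control has reached the late-night (case5) regime
--     while True:
--         if not in5:
--             if t >= timesum:
--                 a, b, c, d = _next4(t)
--                 return (f"Next metro at: {m_h(t)}\n"
--                         f"Subsequent metros at {m_h(a)},{m_h(b)},{m_h(c)},{m_h(d)}...")
--             if t > 1140: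
--                 in5 = True
--                 continue
--             t += 4 if (480 < t <= 600) or (1020 < t <= 1140) else 8
--         else:
--             if t > 1380:
--                 return "Metro is closed now"
--             if t >= timesum:
--                 l = [x for x in _next4(t) if x < 1380]
--                 if len(l) == 4:
--                     return (f"Next metro at: {m_h(t)}\n"
--                             f"Subsequent metros at {m_h(l[0])},{m_h(l[1])},{m_h(l[2])},{m_h(l[3])}...")
--                 if len(l) == 3:
--                     return (f"Next metro at: {m_h(t)}\n"
--                             f"Subsequent metros at {m_h(l[0])},{m_h(l[1])},{m_h(l[2])},")
--                 if len(l) == 2: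
--                     return (f"Next metro at: {m_h(t)}\n"
--                             f"Subsequent metros at {m_h(l[0])},{m_h(l[1])}")
--                 if len(l) == 1:
--                     return (f"Next metro at: {m_h(t)}\n"
--                             f"Subsequent metros at {m_h(l[0])},")
--             t += 8
-- ===== Notes on version B (the rewrite author's own statement) =====
-- stated objective: simpler
-- what changed: Replaced A's chain of five recursive functions (case1/case2peak/case3/case4peak/case5, each re-checking the schedule and delegating at region boundaries) by a single iterative while-loop that advances the time by the region-dependent step and carries one 'late-night regime' flag, with the four follow-up departures computed by a small accumulator loop instead of four repeated inline assignment blocks.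
-- outside the precondition, e.g. on case1(1000000, -5500): A returns 'Metro is closed now', B returns 'Metro is closed now'
import Mathlib
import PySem

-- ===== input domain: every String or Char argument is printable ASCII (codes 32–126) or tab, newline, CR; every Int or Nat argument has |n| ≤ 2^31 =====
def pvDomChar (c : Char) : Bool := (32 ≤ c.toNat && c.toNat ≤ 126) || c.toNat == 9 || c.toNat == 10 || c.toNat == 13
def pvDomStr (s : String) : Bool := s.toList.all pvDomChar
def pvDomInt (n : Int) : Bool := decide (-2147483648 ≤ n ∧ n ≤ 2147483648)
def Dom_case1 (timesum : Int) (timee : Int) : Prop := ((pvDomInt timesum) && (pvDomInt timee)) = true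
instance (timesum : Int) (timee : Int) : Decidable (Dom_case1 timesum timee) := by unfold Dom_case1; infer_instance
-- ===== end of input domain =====

-- B replaces A's chain of five mutually-delegating recursive functions by one iterative
-- scan loop with an explicit late-night flag (objective: simpler control flow, same cost).

-- shared module helpers (identical in Source A and Source B)

-- f'{k:02d}' for width 2: pad a single nonnegative digit with '0'; all other ints already have length ≥ 2
def fmt02 (n : Int) : String :=
  if 0 ≤ n ∧ n < 10 then "0" ++ PySem.Int.toStr n else PySem.Int.toStr n

def m_h (f : Int) : String :=
  fmt02 (PySem.Int.floordiv f 60) ++ ":" ++ fmt02 (PySem.Int.mod f 60)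

def timedealer (time : Int) : Int :=
  if (480 ≤ time ∧ time < 600) ∨ (1020 ≤ time ∧ time < 1140) then 4 else 8


-- termination helper for the ports (cited by name in decreasing_by)
lemma pvStepLt {a t d : Int} (hd : 0 < d) (h2 : t < a) : (a - (t + d)).toNat < (a - t).toNat := by
  rw [Int.toNat_lt_toNat (by simpa using h2)]
  calc a - (t + d) = a - t - d := by ring
  _ < a - t := sub_lt_self _ hd

lemma pvDecAux {k k' : Nat} (h : k' < k) (c c' : Nat) (hc : c' ≤ c) : k' * 2 + c' < k * 2 + c := by
  calc k' * 2 + c' < k * 2 + c' := by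
        exact Nat.add_lt_add_right ((Nat.mul_lt_mul_right (show (0:Nat) < 2 from by decide)).mpr h) c'
  _ ≤ k * 2 + c := Nat.add_le_add_left hc _

-- ===== PORT A =====

-- the full 4-departure format block repeated verbatim in case1/case2peak/case3/case4peak/case5-entry
def quadFmt (t : Int) : String :=
  let t1 := timedealer t + t
  let t2 := timedealer t1 + t1
  let t3 := timedealer t2 + t2
  let t4 := timedealer t3 + t3
  "Next metro at: " ++ m_h t ++ "\nSubsequent metros at " ++ m_h t1 ++ "," ++ m_h t2 ++ "," ++ m_h t3 ++ "," ++ m_h t4 ++ "..."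

def case5 (timesum : Int) (timee : Int) : String :=
  if timee > 1380 then "Metro is closed now"
  else if timee ≥ timesum then
    let t1 := timedealer timee + timee
    let t2 := timedealer t1 + t1
    let t3 := timedealer t2 + t2
    let t4 := timedealer t3 + t3
    let l := [t1, t2, t3, t4].filter (fun x => decide (x < 1380))
    if l.length = 4 then
      "Next metro at: " ++ m_h timee ++ "\nSubsequent metros at " ++ m_h (PySem.List.pyGetD l 0 0) ++ "," ++ m_h (PySem.List.pyGetD l 1 0) ++ "," ++ m_h (PySem.List.pyGetD l 2 0) ++ "," ++ m_h (PySem.List.pyGetD l 3 0) ++ "..."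
    else if l.length = 3 then
      "Next metro at: " ++ m_h timee ++ "\nSubsequent metros at " ++ m_h (PySem.List.pyGetD l 0 0) ++ "," ++ m_h (PySem.List.pyGetD l 1 0) ++ "," ++ m_h (PySem.List.pyGetD l 2 0) ++ ","
    else if l.length = 2 then
      "Next metro at: " ++ m_h timee ++ "\nSubsequent metros at " ++ m_h (PySem.List.pyGetD l 0 0) ++ "," ++ m_h (PySem.List.pyGetD l 1 0)
    else if l.length = 1 then
      "Next metro at: " ++ m_h timee ++ "\nSubsequent metros at " ++ m_h (PySem.List.pyGetD l 0 0) ++ ","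
    else case5 timesum (timee + 8)
  else case5 timesum (timee + 8)
termination_by (1381 - timee).toNat
decreasing_by all_goals exact pvStepLt (by decide) (by omega)

def case4peak (timesum : Int) (timee : Int) : String :=
  if timee ≥ timesum then quadFmt timee
  else if timee > 1140 then case5 timesum timee
  else case4peak timesum (timee + 4)
termination_by (1141 - timee).toNat
decreasing_by exact pvStepLt (by decide) (by omega)

def case3 (timesum : Int) (timee : Int) : String :=
  if timee ≥ timesum then quadFmt timee
  else if timee > 1020 then case4peak timesum timee
  else case3 timesum (timee + 8)
termination_by (1021 - timee).toNat
decreasing_by exact pvStepLt (by decide) (by omega)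

def case2peak (timesum : Int) (timee : Int) : String :=
  if timee ≥ timesum then quadFmt timee
  else if timee > 600 then case3 timesum timee
  else case2peak timesum (timee + 4)
termination_by (601 - timee).toNat
decreasing_by exact pvStepLt (by decide) (by omega)

def case1 (timesum : Int) (timee : Int) : String :=
  if timee ≥ timesum then quadFmt timee
  else if timee > 480 then case2peak timesum timee
  else case1 timesum (timee + 8)
termination_by (481 - timee).toNat
decreasing_by exact pvStepLt (by decide) (by omega)

-- ===== PORT B =====

-- _next4: the next four departure times after t, by a 4-step accumulator loop
def next4 (t : Int) : List Int :=
  ((List.range 4).foldl (fun (st : Int × List Int) _ =>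
    let t' := st.1 + timedealer st.1
    (t', st.2 ++ [t'])) (t, [])).2

-- a,b,c,d = _next4(t); the full 4-departure format ("" is the unreachable unpack failure)
def fullFmt (t : Int) : String :=
  match next4 t with
  | [a, b, c, d] =>
      "Next metro at: " ++ m_h t ++ "\nSubsequent metros at " ++ m_h a ++ "," ++ m_h b ++ "," ++ m_h c ++ "," ++ m_h d ++ "..."
  | _ => ""

-- the while-loop of Source B's case1; in5 = control has reached the late-night regime
def loop (timesum : Int) (t : Int) (in5 : Bool) : String :=
  if in5 = false then
    if t ≥ timesum then fullFmt t
    else if t > 1140 then loop timesum t true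
    else loop timesum (t + (if (480 < t ∧ t ≤ 600) ∨ (1020 < t ∧ t ≤ 1140) then 4 else 8)) false
  else
    if t > 1380 then "Metro is closed now"
    else if t ≥ timesum then
      let l := (next4 t).filter (fun x => decide (x < 1380))
      if l.length = 4 then
        "Next metro at: " ++ m_h t ++ "\nSubsequent metros at " ++ m_h (PySem.List.pyGetD l 0 0) ++ "," ++ m_h (PySem.List.pyGetD l 1 0) ++ "," ++ m_h (PySem.List.pyGetD l 2 0) ++ "," ++ m_h (PySem.List.pyGetD l 3 0) ++ "..."
      else if l.length = 3 then
        "Next metro at: " ++ m_h t ++ "\nSubsequent metros at " ++ m_h (PySem.List.pyGetD l 0 0) ++ "," ++ m_h (PySem.List.pyGetD l 1 0) ++ "," ++ m_h (PySem.List.pyGetD l 2 0) ++ ","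
      else if l.length = 2 then
        "Next metro at: " ++ m_h t ++ "\nSubsequent metros at " ++ m_h (PySem.List.pyGetD l 0 0) ++ "," ++ m_h (PySem.List.pyGetD l 1 0)
      else if l.length = 1 then
        "Next metro at: " ++ m_h t ++ "\nSubsequent metros at " ++ m_h (PySem.List.pyGetD l 0 0) ++ ","
      else loop timesum (t + 8) true
    else loop timesum (t + 8) true
termination_by (1382 - t).toNat * 2 + (if in5 then 0 else 1)
decreasing_by
  · rename_i h1 _ _
    subst h1
    exact Nat.lt_succ_self _
  · rename_i h1 _ _
    subst h1
    exact pvDecAux (pvStepLt (by split <;> decide) (by omega)) _ _ (le_refl _)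
  · rename_i h1 _ _ _ _ _ _
    cases in5 with
    | false => exact absurd rfl h1
    | true => exact pvDecAux (pvStepLt (by decide) (by omega)) _ _ (le_refl _)
  · rename_i h1 _ _
    cases in5 with
    | false => exact absurd rfl h1
    | true => exact pvDecAux (pvStepLt (by decide) (by omega)) _ _ (le_refl _)
def case1_alt (timesum : Int) (timee : Int) : String := loop timesum timee false

-- ===== PRECONDITION & SPEC =====
-- Pre_ excludes very negative starting times (timee < -5000 with timee < timesum), on which A's
-- unbounded recursion exceeds Python's recursion limit and raises RecursionError; the -5000 bound
-- is conservative (A actually starts raising near timee ≈ -6450).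
def Pre_case1 (timesum : Int) (timee : Int) : Prop := timesum ≤ timee ∨ -5000 ≤ timee
instance (timesum : Int) (timee : Int) : Decidable (Pre_case1 timesum timee) := by unfold Pre_case1; infer_instance

def pvWitness_case1 : Int × Int := (1000, 490)

def Spec_case1 (timesum : Int) (timee : Int) (out : String) : Prop := out = case1_alt timesum timee
instance (timesum : Int) (timee : Int) (out : String) : Decidable (Spec_case1 timesum timee out) := by unfold Spec_case1; infer_instance

-- ===== CLAIM (what is proved, stated in full; the proofs are below) =====
def Claim_equal_case1 : Prop := ∀ (timesum : Int) (timee : Int), Dom_case1 timesum timee → Pre_case1 timesum timee → Spec_case1 timesum timee (case1 timesum timee)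

-- ===== LEMMAS AND PROOFS =====

lemma next4_eq (t : Int) :
    next4 t = [timedealer t + t,
               timedealer (timedealer t + t) + (timedealer t + t),
               timedealer (timedealer (timedealer t + t) + (timedealer t + t)) + (timedealer (timedealer t + t) + (timedealer t + t)),
               timedealer (timedealer (timedealer (timedealer t + t) + (timedealer t + t)) + (timedealer (timedealer t + t) + (timedealer t + t))) + (timedealer (timedealer (timedealer t + t) + (timedealer t + t)) + (timedealer (timedealer t + t) + (timedealer t + t)))] := by
  simp [next4, List.range_succ, Int.add_comm]

lemma fullFmt_eq_quadFmt (t : Int) : fullFmt t = quadFmt t := by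
  rw [fullFmt, next4_eq, quadFmt]

-- the shared shape of the late-night (case5-regime) answer block, parametrised by the fallback
def tail5 (t : Int) (fallback : String) : String :=
  let l := (next4 t).filter (fun x => decide (x < 1380))
  if l.length = 4 then
    "Next metro at: " ++ m_h t ++ "\nSubsequent metros at " ++ m_h (PySem.List.pyGetD l 0 0) ++ "," ++ m_h (PySem.List.pyGetD l 1 0) ++ "," ++ m_h (PySem.List.pyGetD l 2 0) ++ "," ++ m_h (PySem.List.pyGetD l 3 0) ++ "..."
  else if l.length = 3 then
    "Next metro at: " ++ m_h t ++ "\nSubsequent metros at " ++ m_h (PySem.List.pyGetD l 0 0) ++ "," ++ m_h (PySem.List.pyGetD l 1 0) ++ "," ++ m_h (PySem.List.pyGetD l 2 0) ++ ","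
  else if l.length = 2 then
    "Next metro at: " ++ m_h t ++ "\nSubsequent metros at " ++ m_h (PySem.List.pyGetD l 0 0) ++ "," ++ m_h (PySem.List.pyGetD l 1 0)
  else if l.length = 1 then
    "Next metro at: " ++ m_h t ++ "\nSubsequent metros at " ++ m_h (PySem.List.pyGetD l 0 0) ++ ","
  else fallback

lemma case5_body (ts t : Int) (h1 : ¬ t > 1380) (h2 : t ≥ ts) :
    case5 ts t = tail5 t (case5 ts (t + 8)) := by
  rw [case5, if_neg h1, if_pos h2, tail5, next4_eq]

lemma loop_true_body (ts t : Int) (h1 : ¬ t > 1380) (h2 : t ≥ ts) :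
    loop ts t true = tail5 t (loop ts (t + 8) true) := by
  rw [loop, if_neg (show ¬((true : Bool) = false) by simp), if_neg h1, if_pos h2, tail5]

lemma loop_false_unfold (ts t : Int) :
    loop ts t false = if t ≥ ts then fullFmt t
      else if t > 1140 then loop ts t true
      else loop ts (t + (if (480 < t ∧ t ≤ 600) ∨ (1020 < t ∧ t ≤ 1140) then 4 else 8)) false := by
  rw [loop, if_pos rfl]

lemma loop_true_eq (n : Nat) : ∀ (ts t : Int), (1381 - t).toNat ≤ n → loop ts t true = case5 ts t := by
  induction n with
  | zero =>
    intro ts t h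
    have h1 : t > 1380 := by omega
    rw [loop, case5, if_neg (show ¬((true : Bool) = false) by simp), if_pos h1, if_pos h1]
  | succ n ih =>
    intro ts t h
    by_cases h1 : t > 1380
    · rw [loop, case5, if_neg (show ¬((true : Bool) = false) by simp), if_pos h1, if_pos h1]
    · by_cases h2 : t ≥ ts
      · rw [loop_true_body ts t h1 h2, case5_body ts t h1 h2, ih ts (t + 8) (by omega)]
      · rw [loop, case5, if_neg (show ¬((true : Bool) = false) by simp), if_neg h1, if_neg h1,
            if_neg h2, if_neg h2]
        exact ih ts (t + 8) (by omega)

lemma loop_false_gt1020 (n : Nat) : ∀ (ts t : Int), 1020 < t → (1141 - t).toNat ≤ n → loop ts t false = case4peak ts t := by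
  induction n with
  | zero =>
    intro ts t hgt h
    rw [loop_false_unfold, case4peak]
    by_cases h2 : t ≥ ts
    · rw [if_pos h2, if_pos h2, fullFmt_eq_quadFmt]
    · have h3 : t > 1140 := by omega
      rw [if_neg h2, if_neg h2, if_pos h3, if_pos h3, loop_true_eq (1381 - t).toNat ts t le_rfl]
  | succ n ih =>
    intro ts t hgt h
    rw [loop_false_unfold, case4peak]
    by_cases h2 : t ≥ ts
    · rw [if_pos h2, if_pos h2, fullFmt_eq_quadFmt]
    · rw [if_neg h2, if_neg h2]
      by_cases h3 : t > 1140
      · rw [if_pos h3, if_pos h3, loop_true_eq (1381 - t).toNat ts t le_rfl]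
      · rw [if_neg h3, if_neg h3,
            if_pos (show (480 < t ∧ t ≤ 600) ∨ (1020 < t ∧ t ≤ 1140) by omega)]
        exact ih ts (t + 4) (by omega) (by omega)

lemma loop_false_gt600 (n : Nat) : ∀ (ts t : Int), 600 < t → (1021 - t).toNat ≤ n → loop ts t false = case3 ts t := by
  induction n with
  | zero =>
    intro ts t hgt h
    have h3 : t > 1020 := by omega
    rw [case3]
    by_cases h2 : t ≥ ts
    · rw [if_pos h2, loop_false_unfold, if_pos h2, fullFmt_eq_quadFmt]
    · rw [if_neg h2, if_pos h3, loop_false_gt1020 (1141 - t).toNat ts t h3 le_rfl]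
  | succ n ih =>
    intro ts t hgt h
    rw [case3]
    by_cases h3 : t > 1020
    · by_cases h2 : t ≥ ts
      · rw [if_pos h2, loop_false_unfold, if_pos h2, fullFmt_eq_quadFmt]
      · rw [if_neg h2, if_pos h3, loop_false_gt1020 (1141 - t).toNat ts t h3 le_rfl]
    · rw [loop_false_unfold]
      by_cases h2 : t ≥ ts
      · rw [if_pos h2, if_pos h2, fullFmt_eq_quadFmt]
      · rw [if_neg h2, if_neg h2, if_neg (show ¬ t > 1140 by omega), if_neg h3,
            if_neg (show ¬((480 < t ∧ t ≤ 600) ∨ (1020 < t ∧ t ≤ 1140)) by omega)]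
        exact ih ts (t + 8) (by omega) (by omega)

lemma loop_false_gt480 (n : Nat) : ∀ (ts t : Int), 480 < t → (601 - t).toNat ≤ n → loop ts t false = case2peak ts t := by
  induction n with
  | zero =>
    intro ts t hgt h
    have h3 : t > 600 := by omega
    rw [case2peak]
    by_cases h2 : t ≥ ts
    · rw [if_pos h2, loop_false_unfold, if_pos h2, fullFmt_eq_quadFmt]
    · rw [if_neg h2, if_pos h3, loop_false_gt600 (1021 - t).toNat ts t h3 le_rfl]
  | succ n ih =>
    intro ts t hgt h
    rw [case2peak]
    by_cases h3 : t > 600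
    · by_cases h2 : t ≥ ts
      · rw [if_pos h2, loop_false_unfold, if_pos h2, fullFmt_eq_quadFmt]
      · rw [if_neg h2, if_pos h3, loop_false_gt600 (1021 - t).toNat ts t h3 le_rfl]
    · rw [loop_false_unfold]
      by_cases h2 : t ≥ ts
      · rw [if_pos h2, if_pos h2, fullFmt_eq_quadFmt]
      · rw [if_neg h2, if_neg h2, if_neg (show ¬ t > 1140 by omega), if_neg h3,
            if_pos (show (480 < t ∧ t ≤ 600) ∨ (1020 < t ∧ t ≤ 1140) by omega)]
        exact ih ts (t + 4) (by omega) (by omega)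

lemma loop_false_eq_case1 (n : Nat) : ∀ (ts t : Int), (481 - t).toNat ≤ n → loop ts t false = case1 ts t := by
  induction n with
  | zero =>
    intro ts t h
    have h3 : t > 480 := by omega
    rw [case1]
    by_cases h2 : t ≥ ts
    · rw [if_pos h2, loop_false_unfold, if_pos h2, fullFmt_eq_quadFmt]
    · rw [if_neg h2, if_pos h3, loop_false_gt480 (601 - t).toNat ts t h3 le_rfl]
  | succ n ih =>
    intro ts t h
    rw [case1]
    by_cases h3 : t > 480
    · by_cases h2 : t ≥ ts
      · rw [if_pos h2, loop_false_unfold, if_pos h2, fullFmt_eq_quadFmt]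
      · rw [if_neg h2, if_pos h3, loop_false_gt480 (601 - t).toNat ts t h3 le_rfl]
    · rw [loop_false_unfold]
      by_cases h2 : t ≥ ts
      · rw [if_pos h2, if_pos h2, fullFmt_eq_quadFmt]
      · rw [if_neg h2, if_neg h2, if_neg (show ¬ t > 1140 by omega), if_neg h3,
            if_neg (show ¬((480 < t ∧ t ≤ 600) ∨ (1020 < t ∧ t ≤ 1140)) by omega)]
        exact ih ts (t + 8) (by omega)

-- ===== VERDICT (by name: the statement is the Claim_ definition above) =====
theorem case1_spec : Claim_equal_case1 := by
  intro timesum timee _ _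
  unfold Spec_case1 case1_alt
  exact (loop_false_eq_case1 ((481 - timee).toNat) timesum timee le_rfl).symm
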